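-- pv_equiv track=rewrite | github.com/5unny400/pythonProjectRemote | 2024_q4/1366_order_rank/test.py | rankTeams
-- ===== SOURCE A (Python) =====
-- import collections
--
-- def rankTeams(votes):
--     """
--     :type votes: List[str]
--     :rtype: str
--     """
--     n = len(votes[0])
--     # 初始化哈希映射
--     ranking = collections.defaultdict(lambda: [0] * n)
--     # 遍历统计
--     for vote in votes:
--         for i, vid in enumerate(vote):
--             ranking[vid][i] += 1
--
--     # 取出所有的键值对
--     result = list(ranking.items())
--     # 排序
--     result.sort(key=lambda x: (x[1], -ord(x[0])), reverse=True)
--     # 将 vid 从字符转换为对应的 ASCII 码，并用其相反数作为第二关键字，这样就与第一关键字保持一致，即都进行降序排序。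
--     return "".join([vid for vid, rank in result])
--
-- votes = ["ABC", "ACB", "ABC", "ACB", "ACB"]
-- ===== SOURCE B (Python) =====
-- def rankTeams(votes):
--     n = len(votes[0])
--     counts = {}
--     for vote in votes:
--         for i, c in enumerate(vote):
--             if c not in counts:
--                 counts[c] = [0] * n
--             counts[c][i] += 1
--
--     def better(a, b):
--         # team a ranks strictly ahead of team b
--         return counts[a] > counts[b] or (counts[a] == counts[b] and a < b)
--
--     ordered = []
--     for c in counts:
--         pos = 0
--         while pos < len(ordered) and better(ordered[pos], c):
--             pos += 1
--         ordered.insert(pos, c)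
--     return "".join(ordered)
-- ===== Notes on version B (the rewrite author's own statement) =====
-- stated objective: alternative
-- what changed: Replaces the single library sort of (team, count-vector) pairs under a composite reversed tuple key with an explicit insertion sort of team letters driven by a direct pairwise 'ranks ahead' comparison, and a plain dict with a membership check instead of a defaultdict.
import Mathlib
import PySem

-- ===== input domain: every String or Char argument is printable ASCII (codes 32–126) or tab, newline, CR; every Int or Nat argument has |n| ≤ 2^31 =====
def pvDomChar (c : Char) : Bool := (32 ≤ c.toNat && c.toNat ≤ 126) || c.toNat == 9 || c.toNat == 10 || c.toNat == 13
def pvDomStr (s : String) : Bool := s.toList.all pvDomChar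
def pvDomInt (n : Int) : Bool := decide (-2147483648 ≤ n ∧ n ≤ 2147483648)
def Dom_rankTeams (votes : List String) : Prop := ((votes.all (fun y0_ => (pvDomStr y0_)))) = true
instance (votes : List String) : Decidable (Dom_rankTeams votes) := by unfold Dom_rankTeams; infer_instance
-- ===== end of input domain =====

-- B replaces the composite-key library sort of (team, count-vector) pairs with an explicit
-- insertion sort of team letters under a direct pairwise comparison (objective: alternative).

-- ===== PORT A =====
def rankTeams (votes : List String) : String :=
  -- n = len(votes[0]); votes = [] raises IndexError (excluded by Pre_), pyGetD is the total form
  let n : Nat := (PySem.List.pyGetD votes 0 "").toList.length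
  -- ranking = defaultdict(lambda: [0]*n); for vote: for i, vid in enumerate(vote): ranking[vid][i] += 1
  -- (an index i ≥ n raises IndexError in Python — excluded by Pre_; pySetD/pyGetD are the total forms)
  let ranking : PySem.Dict Char (List Int) :=
    votes.foldl (fun d vote =>
      (PySem.List.enumerate vote.toList 0).foldl (fun d p =>
        let row := d.getD p.2 (List.replicate n 0)
        d.insert p.2 (PySem.List.pySetD row p.1 (PySem.List.pyGetD row p.1 0 + 1))) d)
      PySem.Dict.empty
  -- result = list(ranking.items()); result.sort(key=lambda x: (x[1], -ord(x[0])), reverse=True)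
  let result := PySem.List.sorted2 ranking.items (fun x => x.2) (fun x => -(x.1.toNat : Int)) true
  -- "".join([vid for vid, rank in result])
  PySem.Str.join "" (result.map (fun x => String.ofList [x.1]))

-- ===== PORT B =====
-- better(a, b) of Source B: counts[a] > counts[b] or (counts[a] == counts[b] and a < b)
def betterB (counts : PySem.Dict Char (List Int)) (a b : Char) : Bool :=
  decide (counts.getD b [] < counts.getD a []) || (counts.getD a [] == counts.getD b [] && decide (a < b))

-- the 'pos' scan + ordered.insert(pos, c) of Source B
def insertTeam (bet : Char → Char → Bool) (c : Char) : List Char → List Char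
  | [] => [c]
  | y :: ys => if bet y c then y :: insertTeam bet c ys else c :: y :: ys

def rankTeams_alt (votes : List String) : String :=
  let n : Nat := (PySem.List.pyGetD votes 0 "").toList.length
  -- plain dict with an explicit membership check; same totalized primitives as above
  let counts : PySem.Dict Char (List Int) :=
    votes.foldl (fun d vote =>
      (PySem.List.enumerate vote.toList 0).foldl (fun d p =>
        let d' := if d.contains p.2 then d else d.insert p.2 (List.replicate n 0)
        let row := d'.getD p.2 []
        d'.insert p.2 (PySem.List.pySetD row p.1 (PySem.List.pyGetD row p.1 0 + 1))) d)
      PySem.Dict.empty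
  -- for c in counts: insertion-sort c into ordered
  let ordered := counts.keys.foldl (fun acc c => insertTeam (betterB counts) c acc) []
  PySem.Str.join "" (ordered.map (fun c => String.ofList [c]))

-- ===== PRECONDITION & SPEC =====
-- Pre_ excludes exactly the inputs on which the Python A raises IndexError: an empty votes
-- list (votes[0]) and a vote longer than votes[0] (ranking[vid][i] += 1 with i out of range).
def Pre_rankTeams (votes : List String) : Prop :=
  votes ≠ [] ∧ ∀ v ∈ votes, v.toList.length ≤ (votes.headI).toList.length
instance (votes : List String) : Decidable (Pre_rankTeams votes) := by unfold Pre_rankTeams; infer_instance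
def pvWitness_rankTeams : List String := ["ABC", "ACB", "ABC", "ACB", "ACB"]

def Spec_rankTeams (votes : List String) (out : String) : Prop := out = rankTeams_alt votes
instance (votes : List String) (out : String) : Decidable (Spec_rankTeams votes out) := by unfold Spec_rankTeams; infer_instance

-- ===== CLAIM (what is proved, stated in full; the proofs are below) =====
def Claim_equal_rankTeams : Prop := ∀ (votes : List String), Dom_rankTeams votes → Pre_rankTeams votes → Spec_rankTeams votes (rankTeams votes)

-- ===== LEMMAS AND PROOFS =====

-- ---- the two counting loops build the same dictionary ----

theorem countStep_eq (n : Nat) (d : PySem.Dict Char (List Int)) (p : Int × Char) :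
    (let row := d.getD p.2 (List.replicate n 0)
     d.insert p.2 (PySem.List.pySetD row p.1 (PySem.List.pyGetD row p.1 0 + 1)))
    = (let d' := if d.contains p.2 then d else d.insert p.2 (List.replicate n 0)
       let row := d'.getD p.2 []
       d'.insert p.2 (PySem.List.pySetD row p.1 (PySem.List.pyGetD row p.1 0 + 1))) := by
  by_cases h : d.contains p.2
  · have : (d.get? p.2).isSome := by rw [← PySem.Dict.contains_eq_isSome_get?, h]
    obtain ⟨r, hr⟩ := Option.isSome_iff_exists.mp this
    simp [h, PySem.Dict.getD_of_get?_eq_some _ _ hr]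
  · simp only [h, Bool.false_eq_true, ite_false]
    rw [PySem.Dict.getD_insert_self, PySem.Dict.insert_insert_self,
        PySem.Dict.getD_of_not_contains _ _ (by simpa using h)]

-- A's counting loop, named for the proofs below
def countDict (n : Nat) (votes : List String) : PySem.Dict Char (List Int) :=
  votes.foldl (fun d vote =>
    (PySem.List.enumerate vote.toList 0).foldl (fun d p =>
      let row := d.getD p.2 (List.replicate n 0)
      d.insert p.2 (PySem.List.pySetD row p.1 (PySem.List.pyGetD row p.1 0 + 1))) d)
    PySem.Dict.empty

def countDictB (n : Nat) (votes : List String) : PySem.Dict Char (List Int) :=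
  votes.foldl (fun d vote =>
    (PySem.List.enumerate vote.toList 0).foldl (fun d p =>
      let d' := if d.contains p.2 then d else d.insert p.2 (List.replicate n 0)
      let row := d'.getD p.2 []
      d'.insert p.2 (PySem.List.pySetD row p.1 (PySem.List.pyGetD row p.1 0 + 1))) d)
    PySem.Dict.empty

theorem counts_eq (votes : List String) (n : Nat) : countDict n votes = countDictB n votes := by
  unfold countDict countDictB
  have hstep : (fun (d : PySem.Dict Char (List Int)) (p : Int × Char) =>
      let row := d.getD p.2 (List.replicate n 0)
      d.insert p.2 (PySem.List.pySetD row p.1 (PySem.List.pyGetD row p.1 0 + 1)))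
      = (fun d p =>
        let d' := if d.contains p.2 then d else d.insert p.2 (List.replicate n 0)
        let row := d'.getD p.2 []
        d'.insert p.2 (PySem.List.pySetD row p.1 (PySem.List.pyGetD row p.1 0 + 1))) := by
    funext d p; exact countStep_eq n d p
  simp only [hstep]

theorem nodup_keys_countDict (n : Nat) (votes : List String) :
    (countDict n votes).keys.Nodup := by
  unfold countDict
  refine List.foldlRecOn (motive := fun (d : PySem.Dict Char (List Int)) => d.keys.Nodup) votes _
    (by show (PySem.Dict.empty (κ := Char) (ν := List Int)).keys.Nodup
        rw [PySem.Dict.keys_empty]; exact List.nodup_nil) ?_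
  intro d hd vote _
  exact PySem.Dict.nodup_keys_foldl_insert_key _ Prod.snd
    (fun d p => PySem.List.pySetD (d.getD p.2 (List.replicate n 0)) p.1
      (PySem.List.pyGetD (d.getD p.2 (List.replicate n 0)) p.1 0 + 1)) d hd

theorem len_items_countDict (n : Nat) (votes : List String) :
    ∀ p ∈ (countDict n votes).items, p.2.length = n := by
  unfold countDict
  refine List.foldlRecOn (motive := fun (d : PySem.Dict Char (List Int)) => ∀ p ∈ d.items, p.2.length = n) votes _
    (by intro q hq; simp [PySem.Dict.empty] at hq) ?_
  intro d hd vote _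
  refine List.foldlRecOn (motive := fun (d : PySem.Dict Char (List Int)) => ∀ p ∈ d.items, p.2.length = n) _ _ hd ?_
  intro d' hd' p _ q hq
  rcases (PySem.Dict.mem_items_insert _ _ _ _).mp hq with h | h
  · subst h
    simp only [PySem.List.length_pySetD]
    rw [PySem.Dict.getD_eq_get?_getD]
    cases hg : d'.get? p.2 with
    | none => simp
    | some r =>
      simpa using hd' (p.2, r) (PySem.Dict.mem_items_of_get?_eq_some _ hg)
  · exact hd' q h.1

theorem getD_len_countDict (n : Nat) (votes : List String) (c : Char)
    (hc : c ∈ (countDict n votes).keys) :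
    ((countDict n votes).getD c []).length = n := by
  have : ∃ v, (c, v) ∈ (countDict n votes).items := by
    simp only [PySem.Dict.keys, List.mem_map] at hc
    obtain ⟨p, hp, he⟩ := hc
    exact ⟨p.2, by rwa [show (c, p.2) = p from by rw [← he]]⟩
  obtain ⟨v, hv⟩ := this
  rw [PySem.Dict.getD_of_mem_items _ hv (nodup_keys_countDict n votes) []]
  exact len_items_countDict n votes (c, v) hv

-- ---- ordering facts ----

-- Python compares the tuple (counts, -ord) exactly like the flat list counts ++ [-ord]
theorem append_singleton_lt (v w : List Int) (a b : Int) (h : v.length = w.length) :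
    (v ++ [a] < w ++ [b]) ↔ (v < w ∨ (v = w ∧ a < b)) := by
  induction v generalizing w with
  | nil =>
    cases w with
    | nil => simp [List.cons_lt_cons_iff]
    | cons y ys => simp at h
  | cons x xs ih =>
    cases w with
    | nil => simp at h
    | cons y ys =>
      simp only [List.length_cons, Nat.add_left_inj] at h
      simp only [List.cons_append, List.cons_lt_cons_iff, ih ys h, List.cons_eq_cons]
      tauto

theorem char_lt_iff (a b : Char) : a < b ↔ a.toNat < b.toNat := by
  rw [Char.lt_def, UInt32.lt_iff_toNat_lt]; rfl

-- B's comparison is the strict order under the flat key counts[c] ++ [-ord(c)]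
theorem better_eq (D : PySem.Dict Char (List Int)) (n : Nat) (a b : Char)
    (ha : (D.getD a []).length = n) (hb : (D.getD b []).length = n) :
    betterB D a b
      = decide ((D.getD b [] ++ [-(b.toNat : Int)]) < (D.getD a [] ++ [-(a.toNat : Int)])) := by
  rw [Bool.eq_iff_iff]
  simp only [betterB, Bool.or_eq_true, Bool.and_eq_true, decide_eq_true_eq, beq_iff_eq,
    append_singleton_lt _ _ _ _ (hb.trans ha.symm), char_lt_iff]
  constructor
  · rintro (h | ⟨he, h⟩)
    · exact Or.inl h
    · exact Or.inr ⟨he.symm, by omega⟩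
  · rintro (h | ⟨he, h⟩)
    · exact Or.inl h
    · exact Or.inr ⟨he.symm, by omega⟩

-- ---- B's insertion sort produces the strictly descending arrangement ----

theorem insertTeam_perm (bet : Char → Char → Bool) (c : Char) (l : List Char) :
    (insertTeam bet c l).Perm (c :: l) := by
  induction l with
  | nil => simp [insertTeam]
  | cons y ys ih =>
    simp only [insertTeam]
    split
    · exact ((ih.cons y).trans (List.Perm.swap c y ys))
    · exact List.Perm.refl _

theorem insertTeam_congr (b1 b2 : Char → Char → Bool) (c : Char) (l : List Char)
    (h : ∀ y ∈ l, b1 y c = b2 y c) : insertTeam b1 c l = insertTeam b2 c l := by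
  induction l with
  | nil => rfl
  | cons y ys ih =>
    simp only [insertTeam, h y (by simp)]
    split
    · rw [ih (fun z hz => h z (by simp [hz]))]
    · rfl

theorem insertTeam_pairwise (kc : Char → List Int) (c : Char) (l : List Char)
    (hl : l.Pairwise (fun a b => kc b < kc a))
    (hne : ∀ y ∈ l, kc y ≠ kc c) :
    (insertTeam (fun y c' => decide (kc c' < kc y)) c l).Pairwise (fun a b => kc b < kc a) := by
  induction l with
  | nil => simp [insertTeam]
  | cons y ys ih =>
    simp only [insertTeam]
    rcases List.pairwise_cons.mp hl with ⟨hy, hys⟩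
    split
    · rename_i hb
      refine List.pairwise_cons.mpr ⟨?_, ih hys (fun z hz => hne z (by simp [hz]))⟩
      intro z hz
      have hz' : z = c ∨ z ∈ ys := List.mem_cons.mp ((insertTeam_perm _ c ys).mem_iff.mp hz)
      rcases hz' with h | h
      · subst h; exact of_decide_eq_true hb
      · exact hy z h
    · rename_i hb
      have hyc : kc y < kc c := by
        simp only [decide_eq_true_eq] at hb
        rcases lt_or_eq_of_le (not_lt.mp hb) with h | h
        · exact h
        · exact absurd h (hne y (by simp))
      refine List.pairwise_cons.mpr ⟨?_, hl⟩
      intro z hz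
      rcases List.mem_cons.mp hz with h | h
      · subst h; exact hyc
      · exact lt_trans (hy z h) hyc

theorem foldl_insertTeam_main (bet : Char → Char → Bool) (kc : Char → List Int) (S : List Char)
    (hbet : ∀ a ∈ S, ∀ b ∈ S, bet a b = decide (kc b < kc a)) :
    ∀ (ks acc : List Char), (∀ c ∈ ks, c ∈ S) → (∀ y ∈ acc, y ∈ S) →
    ks.Pairwise (fun a b => kc a ≠ kc b) →
    acc.Pairwise (fun a b => kc b < kc a) →
    (∀ y ∈ acc, ∀ c ∈ ks, kc y ≠ kc c) →
    (ks.foldl (fun acc c => insertTeam bet c acc) acc).Perm (acc ++ ks)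
    ∧ (ks.foldl (fun acc c => insertTeam bet c acc) acc).Pairwise (fun a b => kc b < kc a) := by
  intro ks
  induction ks with
  | nil => intro acc _ _ _ hacc _; exact ⟨by simp, hacc⟩
  | cons c ks' ih =>
    intro acc hks haccS hkpw hacc hsep
    rcases List.pairwise_cons.mp hkpw with ⟨hchd, hkpw'⟩
    have hcS : c ∈ S := hks c (by simp)
    have hcongr : insertTeam bet c acc = insertTeam (fun y c' => decide (kc c' < kc y)) c acc :=
      insertTeam_congr _ _ c acc (fun y hy => hbet y (haccS y hy) c hcS)
    have hperm1 : (insertTeam bet c acc).Perm (c :: acc) := hcongr ▸ insertTeam_perm _ c acc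
    have hne : ∀ y ∈ acc, kc y ≠ kc c := fun y hy => hsep y hy c (by simp)
    have hpw1 : (insertTeam bet c acc).Pairwise (fun a b => kc b < kc a) := by
      rw [hcongr]; exact insertTeam_pairwise kc c acc hacc hne
    have haccS' : ∀ y ∈ insertTeam bet c acc, y ∈ S := by
      intro y hy
      rcases List.mem_cons.mp (hperm1.mem_iff.mp hy) with h | h
      · subst h; exact hcS
      · exact haccS y h
    have hsep' : ∀ y ∈ insertTeam bet c acc, ∀ c' ∈ ks', kc y ≠ kc c' := by
      intro y hy c' hc'
      rcases List.mem_cons.mp (hperm1.mem_iff.mp hy) with h | h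
      · subst h; exact hchd c' hc'
      · exact hsep y h c' (by simp [hc'])
    have := ih (insertTeam bet c acc) (fun x hx => hks x (by simp [hx])) haccS' hkpw' hpw1 hsep'
    refine ⟨?_, this.2⟩
    simp only [List.foldl_cons]
    exact this.1.trans ((hperm1.append_right ks').trans List.perm_middle.symm)

-- ---- A's composite-key sort equals the plain sort under the flat key ----

theorem insertBy_congr {α : Type} (b1 b2 : α → α → Bool) (x : α) (l : List α)
    (h : ∀ y ∈ l, b1 x y = b2 x y) :
    PySem.List.insertBy b1 x l = PySem.List.insertBy b2 x l := by
  induction l with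
  | nil => rfl
  | cons y ys ih =>
    simp only [PySem.List.insertBy, h y (by simp)]
    split
    · rfl
    · rw [ih (fun z hz => h z (by simp [hz]))]

theorem foldl_insertBy_congr {α : Type} (b1 b2 : α → α → Bool) (S : List α)
    (h : ∀ a ∈ S, ∀ b ∈ S, b1 a b = b2 a b) :
    ∀ (l acc : List α), (∀ x ∈ l, x ∈ S) → (∀ y ∈ acc, y ∈ S) →
    l.foldl (fun acc x => PySem.List.insertBy b1 x acc) acc
      = l.foldl (fun acc x => PySem.List.insertBy b2 x acc) acc := by
  intro l
  induction l with
  | nil => intro acc _ _; rfl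
  | cons x xs ih =>
    intro acc hl hacc
    have hx : x ∈ S := hl x (by simp)
    have h1 : PySem.List.insertBy b1 x acc = PySem.List.insertBy b2 x acc :=
      insertBy_congr _ _ x acc (fun y hy => h x hx y (hacc y hy))
    simp only [List.foldl_cons, h1]
    exact ih _ (fun z hz => hl z (by simp [hz]))
      (fun y hy => by
        rcases (PySem.List.mem_insertBy b2 x y acc).mp (h1 ▸ hy) with h' | h'
        · exact h' ▸ hx
        · exact hacc y h')

theorem sorted2_eq_sorted_rev (items : List (Char × List Int)) (n : Nat)
    (hlen : ∀ p ∈ items, p.2.length = n) :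
    PySem.List.sorted2 items (fun x => x.2) (fun x => -(x.1.toNat : Int)) true
      = PySem.List.sorted items (fun p => p.2 ++ [-(p.1.toNat : Int)]) true := by
  show items.foldl (fun acc x => PySem.List.insertBy _ x acc) []
    = items.foldl (fun acc x => PySem.List.insertBy _ x acc) []
  apply foldl_insertBy_congr _ _ items _ items [] (fun x hx => hx) (by simp)
  intro a ha b hb
  show (decide (b.2 < a.2) || (!decide (a.2 < b.2) && decide (-(b.1.toNat : Int) < -(a.1.toNat : Int))))
    = decide ((b.2 ++ [-(b.1.toNat : Int)]) < (a.2 ++ [-(a.1.toNat : Int)]))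
  rw [Bool.eq_iff_iff]
  simp only [Bool.or_eq_true, Bool.and_eq_true, Bool.not_eq_true', decide_eq_true_eq,
    decide_eq_false_iff_not, append_singleton_lt _ _ _ _ ((hlen b hb).trans (hlen a ha).symm)]
  rcases lt_trichotomy (a.2) (b.2) with h | h | h
  · constructor
    · rintro (h' | ⟨h', _⟩)
      · exact absurd h (asymm h')
      · exact absurd h h'
    · rintro (h' | ⟨h', _⟩)
      · exact absurd h (asymm h')
      · exact absurd h' (ne_of_gt h)
  · simp [h]
  · tauto

-- ---- the ordered team letters agree ----

theorem core_order (n : Nat) (votes : List String) :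
    (PySem.List.sorted2 (countDict n votes).items (fun x => x.2) (fun x => -(x.1.toNat : Int)) true).map
        (fun x => String.ofList [x.1])
      = ((countDict n votes).keys.foldl
          (fun acc c => insertTeam (betterB (countDict n votes)) c acc) []).map
        (fun c => String.ofList [c]) := by
  set D := countDict n votes with hD
  have hnd : D.keys.Nodup := nodup_keys_countDict n votes
  have hlen : ∀ p ∈ D.items, p.2.length = n := len_items_countDict n votes
  have hklen : ∀ c ∈ D.keys, (D.getD c []).length = n := fun c hc => getD_len_countDict n votes c hc
  have hbet : ∀ a ∈ D.keys, ∀ b ∈ D.keys,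
      betterB D a b = decide ((D.getD b [] ++ [-(b.toNat : Int)]) < (D.getD a [] ++ [-(a.toNat : Int)])) :=
    fun a ha b hb => better_eq D n a b (hklen a ha) (hklen b hb)
  have hkpw : D.keys.Pairwise
      (fun a b => (D.getD a [] ++ [-(a.toNat : Int)]) ≠ (D.getD b [] ++ [-(b.toNat : Int)])) := by
    refine hnd.imp_of_mem ?_
    intro a b ha hb hne heq
    apply hne
    have h2 := (List.append_inj heq ((hklen a ha).trans (hklen b hb).symm)).2
    have h3 : a.toNat = b.toNat := by
      have := List.head_eq_of_cons_eq h2; omega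
    exact Char.ext (UInt32.toNat_inj.mp h3)
  have hmain := foldl_insertTeam_main (betterB D)
    (fun c => D.getD c [] ++ [-(c.toNat : Int)]) D.keys hbet D.keys []
    (fun c h => h) (by simp) hkpw (by simp) (by simp)
  rw [sorted2_eq_sorted_rev D.items n hlen]
  have hA : PySem.List.sorted D.items (fun p => p.2 ++ [-(p.1.toNat : Int)]) true
      = (D.keys.foldl (fun acc c => insertTeam (betterB D) c acc) []).map
          (fun c => (c, D.getD c [])) := by
    have hperm : ((D.keys.foldl (fun acc c => insertTeam (betterB D) c acc) []).map
        (fun c => (c, D.getD c []))).Perm D.items := by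
      rw [PySem.Dict.items_eq_map_keys D hnd []]
      exact ((by simpa using hmain.1 : (D.keys.foldl (fun acc c => insertTeam (betterB D) c acc) []).Perm D.keys).map _)
    have hpw : ((D.keys.foldl (fun acc c => insertTeam (betterB D) c acc) []).map
        (fun c => (c, D.getD c []))).Pairwise
        (fun a b => (b.2 ++ [-(b.1.toNat : Int)]) < (a.2 ++ [-(a.1.toNat : Int)])) := by
      rw [List.pairwise_map]
      exact hmain.2
    convert PySem.List.sorted_rev_eq_of_perm_of_pairwise_gt D.items _
      (fun p => p.2 ++ [-(p.1.toNat : Int)]) hperm hpw using 2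
  rw [hA, List.map_map]
  rfl

-- ===== VERDICT (by name: the statement is the Claim_ definition above) =====
theorem rankTeams_spec : Claim_equal_rankTeams := by
  intro votes _ _
  have hA : rankTeams votes
      = PySem.Str.join ""
        ((PySem.List.sorted2 (countDict ((PySem.List.pyGetD votes 0 "").toList.length) votes).items
          (fun x => x.2) (fun x => -(x.1.toNat : Int)) true).map (fun x => String.ofList [x.1])) := rfl
  have hB : rankTeams_alt votes
      = PySem.Str.join ""
        (((countDictB ((PySem.List.pyGetD votes 0 "").toList.length) votes).keys.foldl
          (fun acc c => insertTeam (betterB (countDictB ((PySem.List.pyGetD votes 0 "").toList.length) votes)) c acc) []).map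
          (fun c => String.ofList [c])) := rfl
  show rankTeams votes = rankTeams_alt votes
  rw [hA, hB, ← counts_eq votes ((PySem.List.pyGetD votes 0 "").toList.length)]
  exact congrArg _ (core_order ((PySem.List.pyGetD votes 0 "").toList.length) votes)
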